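-- pv_equiv track=rewrite | github.com/smallzhao/wavchecker | plugins/audiofilters/src/filters/noise/noise_detect.py | calEnergy
-- ===== SOURCE A (Python) =====
-- def calEnergy(wav_data):
--     # 每256个采样点为一帧，分帧计算每一帧的总能量
--     ene = []
--     total = 0
--     for i in range(len(wav_data)):
--         total = total + (int(wav_data[i]) * int(wav_data[i]))
--         if (i + 1) % 256 == 0:
--             ene.append(total)
--             total = 0
--         elif i == len(wav_data) - 1:
--             ene.append(total)
--     return ene
-- ===== SOURCE B (Python) =====
-- def calEnergy(wav_data):
--     # one frame per 256-sample slice; sum of squares of each frame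
--     ene = []
--     for i in range(0, len(wav_data), 256):
--         frame = wav_data[i:i + 256]
--         ene.append(sum(int(x) * int(x) for x in frame))
--     return ene
-- ===== Notes on version B (the rewrite author's own statement) =====
-- stated objective: simpler
-- what changed: Replaces A's flat index loop with a running accumulator and per-sample modulo/last-index boundary tests by an outer loop over frame-start indices that slices each 256-sample frame and sums its squares with a builtin sum.
import Mathlib
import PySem

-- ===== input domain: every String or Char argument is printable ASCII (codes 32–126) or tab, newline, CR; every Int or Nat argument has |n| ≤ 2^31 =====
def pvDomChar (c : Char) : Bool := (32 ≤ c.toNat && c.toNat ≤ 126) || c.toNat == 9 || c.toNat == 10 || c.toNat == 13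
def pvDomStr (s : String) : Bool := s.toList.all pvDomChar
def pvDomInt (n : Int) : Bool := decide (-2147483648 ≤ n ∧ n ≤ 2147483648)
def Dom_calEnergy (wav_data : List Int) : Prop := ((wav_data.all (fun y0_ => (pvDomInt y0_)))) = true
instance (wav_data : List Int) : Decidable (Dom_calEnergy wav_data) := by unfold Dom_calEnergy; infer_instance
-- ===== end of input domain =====

-- B replaces A's flat index loop (running total + modulo/last-index boundary tests)
-- by an outer loop over frame starts that slices each 256-sample frame and sums its squares: simpler.


-- ===== PORT A =====
def calEnergy (wav_data : List Int) : List Int :=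
  ((PySem.List.pyRange 0 (wav_data.length : Int) 1).foldl
    (fun (st : List Int × Int) i =>
      let total := st.2 + PySem.List.pyGetD wav_data i 0 * PySem.List.pyGetD wav_data i 0
      if PySem.Int.mod (i + 1) 256 = 0 then (st.1 ++ [total], 0)
      else if i = (wav_data.length : Int) - 1 then (st.1 ++ [total], total)
      else (st.1, total))
    ([], 0)).1

-- ===== PORT B =====
def calEnergy_alt (wav_data : List Int) : List Int :=
  (PySem.List.pyRange 0 (wav_data.length : Int) 256).foldl
    (fun ene i =>
      let frame := PySem.List.slice wav_data (some i) (some (i + 256))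
      ene ++ [(frame.map (fun x => x * x)).sum]) []

-- ===== PRECONDITION & SPEC =====
def Spec_calEnergy (wav_data : List Int) (out : List Int) : Prop := out = calEnergy_alt wav_data
instance (wav_data : List Int) (out : List Int) : Decidable (Spec_calEnergy wav_data out) := by unfold Spec_calEnergy; infer_instance

-- ===== CLAIM (what is proved, stated in full; the proofs are below) =====
def Claim_equal_calEnergy : Prop := ∀ (wav_data : List Int), Dom_calEnergy wav_data → Spec_calEnergy wav_data (calEnergy wav_data)

-- ===== LEMMAS AND PROOFS =====

-- common specification: frame energies, with `total` the partial sum of the current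
-- frame and `r` the number of slots remaining in it
def specA (total : Int) (r : Nat) : List Int → List Int
  | [] => []
  | x :: rest =>
    if r = 1 then (total + x * x) :: specA 0 256 rest
    else if rest = [] then [total + x * x]
    else specA (total + x * x) (r - 1) rest

lemma pyRange256_nil {a b : Int} (h : b ≤ a) : PySem.List.pyRange a b 256 = [] := by
  rw [PySem.List.pyRange_of_pos a b (by norm_num)]
  simp [show ¬ a < b by omega]

lemma pyRange256_cons {a b : Int} (h : a < b) :
    PySem.List.pyRange a b 256 = a :: PySem.List.pyRange (a + 256) b 256 := by
  rw [PySem.List.pyRange_of_pos a b (by norm_num : (0:Int) < 256),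
      PySem.List.pyRange_of_pos (a + 256) b (by norm_num : (0:Int) < 256)]
  by_cases h2 : a + 256 < b
  · have hm : ((b - a + 256 - 1) / 256).toNat = ((b - (a + 256) + 256 - 1) / 256).toNat + 1 := by
      omega
    rw [if_pos h, if_pos h2, hm, List.range_succ_eq_map]
    simp [List.map_map, Function.comp_def]
    intro k _; ring
  · have hm : ((b - a + 256 - 1) / 256).toNat = 1 := by omega
    rw [if_pos h, if_neg h2, hm]
    simp

lemma foldl_range_enum {β : Type} (g : β → Int → Int → β) (full : List Int) :
    ∀ (m a : Nat) (init : β), full.length - a = m →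
      (PySem.List.pyRange (a : Int) (full.length : Int) 1).foldl
          (fun acc i => g acc i (PySem.List.pyGetD full i 0)) init
        = (PySem.List.enumerate (full.drop a) (a : Int)).foldl (fun acc p => g acc p.1 p.2) init := by
  intro m
  induction m with
  | zero =>
    intro a init hm
    have hle : full.length ≤ a := by omega
    rw [PySem.List.pyRange_one_eq_nil (by exact_mod_cast hle), List.drop_eq_nil_of_le hle]
    simp [PySem.List.enumerate]
  | succ m ih =>
    intro a init hm
    have hlt : a < full.length := by omega
    rw [PySem.List.pyRange_one_cons (by exact_mod_cast hlt),
        List.drop_eq_getElem_cons hlt, PySem.List.enumerate_cons]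
    simp only [List.foldl_cons]
    rw [PySem.List.pyGetD_eq_getElem full 0 (by positivity) (by exact_mod_cast hlt)]
    simp only [Int.toNat_natCast]
    have := ih (a + 1) (g init (a : Int) full[a]) (by omega)
    push_cast at this ⊢
    exact this

-- A's loop body, abstracted over the fetched sample value
def stepA (n : Int) (st : List Int × Int) (i v : Int) : List Int × Int :=
  let total := st.2 + v * v
  if PySem.Int.mod (i + 1) 256 = 0 then (st.1 ++ [total], 0)
  else if i = n - 1 then (st.1 ++ [total], total)
  else (st.1, total)

lemma specA_full (xs : List Int) : ∀ (total : Int) (r : Nat), xs ≠ [] → 1 ≤ r →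
    specA total r xs
      = (total + ((xs.take r).map (fun x => x * x)).sum) :: specA 0 256 (xs.drop r) := by
  induction xs with
  | nil => intro _ _ h _; exact absurd rfl h
  | cons x rest ih =>
    intro total r _ hr
    by_cases h1 : r = 1
    · subst h1; simp [specA]
    · obtain ⟨r', rfl⟩ : ∃ r', r = r' + 1 := ⟨r - 1, by omega⟩
      by_cases h2 : rest = []
      · subst h2
        simp [specA]
      · have hr' : 1 ≤ r' := by omega
        rw [List.take_succ_cons, List.drop_succ_cons]
        simp only [specA, if_neg h1, if_neg h2, Nat.add_sub_cancel]
        rw [ih (total + x * x) r' h2 hr']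
        simp only [List.map_cons, List.sum_cons]
        rw [add_assoc]

lemma A_loop (full : List Int) : ∀ (xs : List Int) (a : Nat) (total : Int) (r : Nat)
    (acc : List Int), a + xs.length = full.length → a % 256 + r = 256 →
    ((PySem.List.enumerate xs (a : Int)).foldl
        (fun st p => stepA (full.length : Int) st p.1 p.2) (acc, total)).1
      = acc ++ specA total r xs := by
  intro xs
  induction xs with
  | nil => intro a total r acc _ _; simp [PySem.List.enumerate, specA]
  | cons x rest ih =>
    intro a total r acc hlen hmod
    rw [PySem.List.enumerate_cons, List.foldl_cons]
    have hcast : PySem.Int.mod ((a : Int) + 1) 256 = (((a + 1) % 256 : Nat) : Int) := by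
      rw [show ((a : Int) + 1) = ((a + 1 : Nat) : Int) by push_cast; ring,
          show (256 : Int) = ((256 : Nat) : Int) by norm_num, PySem.Int.mod_natCast]
    by_cases h1 : r = 1
    · have hc : PySem.Int.mod ((a : Int) + 1) 256 = 0 := by
        rw [hcast]; exact_mod_cast (by omega : (a + 1) % 256 = 0)
      have hstep : stepA (full.length : Int) (acc, total) ((a : Int), x).1 ((a : Int), x).2
          = (acc ++ [total + x * x], 0) := by
        simp only [stepA]; rw [if_pos hc]
      rw [hstep, show ((a : Int) + 1) = ((a + 1 : Nat) : Int) by push_cast; ring]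
      rw [ih (a + 1) 0 256 (acc ++ [total + x * x]) (by simp at hlen ⊢; omega) (by omega)]
      subst h1; simp [specA]
    · have hc : ¬ PySem.Int.mod ((a : Int) + 1) 256 = 0 := by
        rw [hcast]
        exact_mod_cast (by omega : ¬ (a + 1) % 256 = 0)
      by_cases h2 : rest = []
      · subst h2
        have hl : a + 1 = full.length := by simpa using hlen
        have hc2 : (a : Int) = (full.length : Int) - 1 := by omega
        have hstep : stepA (full.length : Int) (acc, total) ((a : Int), x).1 ((a : Int), x).2
            = (acc ++ [total + x * x], total + x * x) := by
          simp only [stepA]; rw [if_neg hc, if_pos hc2]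
        rw [hstep]
        simp [PySem.List.enumerate, specA, h1]
      · have hc2 : ¬ (a : Int) = (full.length : Int) - 1 := by
          have : 1 ≤ rest.length := List.length_pos_iff.mpr h2
          simp only [List.length_cons] at hlen; omega
        have hstep : stepA (full.length : Int) (acc, total) ((a : Int), x).1 ((a : Int), x).2
            = (acc, total + x * x) := by
          simp only [stepA]; rw [if_neg hc, if_neg hc2]
        rw [hstep, show ((a : Int) + 1) = ((a + 1 : Nat) : Int) by push_cast; ring]
        rw [ih (a + 1) (total + x * x) (r - 1) acc (by simp at hlen ⊢; omega) (by omega)]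
        simp [specA, h1, h2]

lemma B_loop (full : List Int) : ∀ (m a : Nat) (acc : List Int), full.length - a ≤ m →
    (PySem.List.pyRange (a : Int) (full.length : Int) 256).foldl
        (fun ene i =>
          ene ++ [((PySem.List.slice full (some i) (some (i + 256))).map (fun x => x * x)).sum])
        acc
      = acc ++ specA 0 256 (full.drop a) := by
  intro m
  induction m with
  | zero =>
    intro a acc hm
    have hle : full.length ≤ a := by omega
    rw [pyRange256_nil (by exact_mod_cast hle), List.drop_eq_nil_of_le hle]
    simp [specA]
  | succ m ih =>
    intro a acc hm
    by_cases hlt : a < full.length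
    · rw [pyRange256_cons (by exact_mod_cast hlt), List.foldl_cons]
      have hslice : PySem.List.slice full (some (a : Int)) (some ((a : Int) + 256))
          = (full.drop a).take 256 := by
        rw [show ((a : Int) + 256) = ((a + 256 : Nat) : Int) by push_cast; ring,
            PySem.List.slice_toNat full (by positivity) (by positivity)]
        simp
        omega
      rw [hslice, show ((a : Int) + 256) = ((a + 256 : Nat) : Int) by push_cast; ring,
          ih (a + 256) _ (by omega)]
      rw [specA_full (full.drop a) 0 256 (by simp [List.drop_eq_nil_iff]; omega) (by omega)]
      simp [List.drop_drop, List.append_assoc]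
    · rw [pyRange256_nil (by exact_mod_cast (by omega : full.length ≤ a)),
          List.drop_eq_nil_of_le (by omega)]
      simp [specA]

-- ===== VERDICT (by name: the statement is the Claim_ definition above) =====
theorem calEnergy_spec : Claim_equal_calEnergy := by
  intro wav_data _
  show calEnergy wav_data = calEnergy_alt wav_data
  have hA : calEnergy wav_data
      = ((PySem.List.pyRange ((0 : Nat) : Int) (wav_data.length : Int) 1).foldl
          (fun st i => stepA (wav_data.length : Int) st i (PySem.List.pyGetD wav_data i 0))
          ([], 0)).1 := rfl
  rw [hA, foldl_range_enum (stepA (wav_data.length : Int)) wav_data wav_data.length 0 ([], 0)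
        (by omega)]
  rw [List.drop_zero] at *
  rw [A_loop wav_data wav_data 0 0 256 [] (by simp) (by norm_num)]
  have hB : calEnergy_alt wav_data
      = (PySem.List.pyRange ((0 : Nat) : Int) (wav_data.length : Int) 256).foldl
          (fun ene i =>
            ene ++ [((PySem.List.slice wav_data (some i) (some (i + 256))).map
              (fun x => x * x)).sum]) [] := rfl
  rw [hB, B_loop wav_data wav_data.length 0 [] (by omega)]
  simp
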